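-- pv_equiv track=rewrite | github.com/saha18uiuc/sailor | sailor/Planner/sailor_planner/utils.py | partition_sailor
-- ===== SOURCE A (Python) =====
-- def partition_sailor(num_items, num_parts):
--     chunk_size = num_items // num_parts
--     residual = num_items % num_parts
--     residual = num_parts - residual
--
--     stages = [[] for _ in range(num_parts)]
--     start = 0
--     for i in range(num_parts):
--         stage_size = chunk_size if i < residual else chunk_size+1
--         stage = list(range(start, stage_size+start))
--         start += stage_size
--         stages[i] = stage
--     return stages
-- ===== SOURCE B (Python) =====
-- def partition_sailor(num_items, num_parts):
--     chunk = num_items // num_parts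
--     r = num_items % num_parts
--     a = num_parts - r
--
--     def start(i):
--         return i * chunk + max(0, i - a)
--
--     return [list(range(start(i), start(i + 1))) for i in range(num_parts)]
-- ===== Notes on version B (the rewrite author's own statement) =====
-- stated objective: alternative
-- what changed: Replaces A's running-start accumulator with in-loop size branch and index assignment into a preallocated list by a closed-form start-offset formula start(i) = i*chunk + max(0, i - (num_parts - r)), emitting part i directly as range(start(i), start(i+1)) in one comprehension.
import Mathlib
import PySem

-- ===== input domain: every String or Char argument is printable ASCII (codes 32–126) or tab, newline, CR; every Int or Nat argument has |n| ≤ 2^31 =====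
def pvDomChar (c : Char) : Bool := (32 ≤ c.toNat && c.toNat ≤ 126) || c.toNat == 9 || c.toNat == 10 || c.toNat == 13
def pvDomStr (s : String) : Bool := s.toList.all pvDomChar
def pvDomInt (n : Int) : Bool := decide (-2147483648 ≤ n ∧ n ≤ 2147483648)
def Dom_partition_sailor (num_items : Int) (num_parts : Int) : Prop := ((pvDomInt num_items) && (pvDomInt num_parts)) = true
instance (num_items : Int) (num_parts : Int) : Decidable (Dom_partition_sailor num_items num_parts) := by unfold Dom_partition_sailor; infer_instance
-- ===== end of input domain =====

-- B replaces A's running-start accumulator and in-loop size branch by a closed-form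
-- start-offset formula, emitting each part directly as range(start(i), start(i+1)).

-- ===== PORT A =====
def partition_sailor (num_items : Int) (num_parts : Int) : List (List Int) :=
  let chunk_size := PySem.Int.floordiv num_items num_parts
  let residual0 := PySem.Int.mod num_items num_parts
  let residual := num_parts - residual0
  let stages : List (List Int) := (PySem.List.pyRange 0 num_parts 1).map (fun _ => [])
  let res := (PySem.List.pyRange 0 num_parts 1).foldl
    (fun (acc : Int × List (List Int)) i =>
      (acc.1 + (if i < residual then chunk_size else chunk_size + 1),
       acc.2.set i.toNat
         (PySem.List.pyRange acc.1 ((if i < residual then chunk_size else chunk_size + 1) + acc.1) 1)))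
    (0, stages)
  res.2

-- ===== PORT B =====
def partition_sailor_alt (num_items : Int) (num_parts : Int) : List (List Int) :=
  let chunk := PySem.Int.floordiv num_items num_parts
  let r := PySem.Int.mod num_items num_parts
  let a := num_parts - r
  let start := fun (i : Int) => i * chunk + max 0 (i - a)
  (PySem.List.pyRange 0 num_parts 1).map
    (fun i => PySem.List.pyRange (start i) (start (i + 1)) 1)

-- ===== PRECONDITION & SPEC =====
-- Pre_ excludes only num_parts = 0, where Python A raises ZeroDivisionError.
def Pre_partition_sailor (_num_items : Int) (num_parts : Int) : Prop := num_parts ≠ 0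
instance (num_items : Int) (num_parts : Int) : Decidable (Pre_partition_sailor num_items num_parts) := by unfold Pre_partition_sailor; infer_instance
def pvWitness_partition_sailor : Int × Int := (7, 3)

def Spec_partition_sailor (num_items : Int) (num_parts : Int) (out : List (List Int)) : Prop := out = partition_sailor_alt num_items num_parts
instance (num_items : Int) (num_parts : Int) (out : List (List Int)) : Decidable (Spec_partition_sailor num_items num_parts out) := by unfold Spec_partition_sailor; infer_instance

-- ===== CLAIM (what is proved, stated in full; the proofs are below) =====
def Claim_equal_partition_sailor : Prop := ∀ (num_items : Int) (num_parts : Int), Dom_partition_sailor num_items num_parts → Pre_partition_sailor num_items num_parts → Spec_partition_sailor num_items num_parts (partition_sailor num_items num_parts)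

-- ===== LEMMAS AND PROOFS =====

-- Loop invariant for A's fold: starting from start k with the first k slots already
-- filled, the fold over indices [k, k+m) fills the next m slots with the closed-form parts.
theorem pvFoldA
    (size start : Int → Int)
    (h : ∀ k : Nat, start k + size k = start (k + 1)) :
    ∀ (m k : Nat) (pre : List (List Int)), pre.length = k →
    (List.foldl
      (fun (acc : Int × List (List Int)) i =>
        (acc.1 + size i,
         acc.2.set i.toNat (PySem.List.pyRange acc.1 (size i + acc.1) 1)))
      (start k, pre ++ List.replicate m ([] : List Int))
      (List.map (fun (j : Nat) => (j : Int)) (List.range' k m)))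
    = (start (k + m),
       pre ++ List.map (fun (j:Nat) => PySem.List.pyRange (start (j : Int)) (start ((j : Int) + 1)) 1) (List.range' k m)) := by
  intro m
  induction m with
  | zero => intro k pre hpre; simp
  | succ m ih =>
    intro k pre hpre
    rw [List.range'_succ]
    rw [List.map_cons, List.foldl_cons]
    have hsz : size (k : Int) + start k = start ((k : Int) + 1) := by
      have := h k
      push_cast at this ⊢
      linarith
    have hset : (pre ++ List.replicate (m + 1) ([] : List Int)).set (Int.toNat (k : Int))
        (PySem.List.pyRange (start k) (size k + start k) 1)
        = (pre ++ [PySem.List.pyRange (start (k : Int)) (start ((k : Int) + 1)) 1])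
          ++ List.replicate m ([] : List Int) := by
      rw [hsz]
      rw [List.replicate_succ, Int.toNat_natCast, List.set_append_right _ _ (by omega)]
      simp [hpre]
    rw [hset]
    rw [show start (k : Int) + size (k : Int) = start ((k + 1 : Nat) : Int) by
      push_cast; linarith [hsz]]
    rw [ih (k + 1) (pre ++ [PySem.List.pyRange (start (k : Int)) (start ((k : Int) + 1)) 1])
        (by simp [hpre])]
    simp only [Prod.mk.injEq]
    constructor
    · congr 1; push_cast; ring
    · simp [List.append_assoc]

-- The closed-form start offsets satisfy A's step recurrence.
theorem pvStartStep (chunk a : Int) (_ha : 0 ≤ a) (k : Nat) :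
    ((k : Int) * chunk + max 0 ((k : Int) - a))
      + (if (k : Int) < a then chunk else chunk + 1)
    = ((k : Int) + 1) * chunk + max 0 ((k : Int) + 1 - a) := by
  have hm : ((k : Int) + 1) * chunk = (k : Int) * chunk + chunk := by ring
  rw [hm]
  rcases le_or_gt a (k : Int) with hk | hk
  · rw [if_neg (by omega), max_eq_right (by omega), max_eq_right (by omega)]
    ring
  · rw [if_pos hk, max_eq_left (by omega)]
    rcases lt_or_ge ((k : Int) + 1 - a) 0 with h2 | h2
    · rw [max_eq_left (by omega)]; ring
    · have : (k : Int) + 1 - a = 0 := by omega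
      rw [this]; simp

-- ===== VERDICT (by name: the statement is the Claim_ definition above) =====
theorem partition_sailor_spec : Claim_equal_partition_sailor := by
  intro num_items num_parts _ hpre
  unfold Spec_partition_sailor
  simp only [partition_sailor, partition_sailor_alt]
  set chunk := PySem.Int.floordiv num_items num_parts with hchunk
  set r := PySem.Int.mod num_items num_parts with hr
  rcases lt_or_gt_of_ne hpre with hneg | hpos
  · rw [PySem.List.pyRange_one_eq_nil (by omega)]
    simp
  · have hr0 : 0 ≤ r := by
      rw [hr, PySem.Int.mod_eq_emod_of_pos hpos]
      exact Int.emod_nonneg _ (by omega)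
    have hrlt : r < num_parts := by
      rw [hr, PySem.Int.mod_eq_emod_of_pos hpos]
      exact Int.emod_lt_of_pos _ hpos
    have ha : 0 ≤ num_parts - r := by omega
    have hnp : (num_parts.toNat : Int) = num_parts := Int.toNat_of_nonneg (by omega)
    have hrange : PySem.List.pyRange 0 num_parts 1
        = List.map (fun (j : Nat) => (j : Int)) (List.range' 0 num_parts.toNat) := by
      rw [PySem.List.pyRange_one, List.range_eq_range']
      simp
    rw [hrange]
    rw [show (List.map (fun (j : Nat) => (j : Int)) (List.range' 0 num_parts.toNat)).map
          (fun _ => ([] : List Int)) = List.replicate num_parts.toNat ([] : List Int) by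
        simp [Function.comp_def, List.map_const', List.length_range']]
    have hmain := pvFoldA
      (fun i => if i < num_parts - r then chunk else chunk + 1)
      (fun i => i * chunk + max 0 (i - (num_parts - r)))
      (fun k => pvStartStep chunk (num_parts - r) ha k)
      num_parts.toNat 0 [] rfl
    simp only [Nat.cast_zero, List.nil_append] at hmain
    rw [show (0 : Int) * chunk + max 0 (0 - (num_parts - r)) = 0 by
          rw [zero_mul, zero_sub, zero_add, max_eq_left (by omega)]] at hmain
    rw [hmain, List.map_map]
    simp [Function.comp_def]
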